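-- pv_equiv track=rewrite | github.com/soul-codes/mango-tango-cli | data_utils/str_quantiles.py | str_quantiles
-- ===== SOURCE A (Python) =====
-- import math
--
-- def str_quantiles(str_min: str, str_max: str, n: int):
--   if str_max < str_min:
--     str_min, str_max = str_max, str_min
--   if len(str_min) == 0 and len(str_max) == 0:
--     return [""]
--   ord_min = ord(str_min[0]) if str_min else 0
--   ord_max = ord(str_max[0]) + 1
--   if (ord_max - ord_min) >= n:
--     return [
--       chr(ord_q) if ord_q else ""
--       for ord_q in int_quantiles(ord_min, ord_max, n)
--     ]
--   sub_n = math.ceil(n / (ord_max - ord_min))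
--   return [
--     f"{chr(ord_this)}{sub_char}"
--     for sub_char in str_quantiles(str_min[1:], str_max[1:], sub_n)
--     for ord_this in range(ord_min, ord_max + 1)
--   ]
--
-- def int_quantiles(min: int, max: int, n: int):
--   if min == max:
--     return [min]
--   if n == 1:
--     return [min, max]
--   return [min + i * (max - min) // n for i in range(n + 1)]
-- ===== SOURCE B (Python) =====
-- def str_quantiles(str_min: str, str_max: str, n: int):
--     # Iterative CPS formulation: one descending loop composes a builder closure
--     # per character position instead of recursing; the quantile seed is computed
--     # by a single inlined formula (no int_quantiles helper, no special cases).
--     lo, hi = (str_max, str_min) if str_max < str_min else (str_min, str_max)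
--     build = lambda acc: acc
--     cur = n
--     while lo or hi:
--         omin = ord(lo[0]) if lo else 0
--         omax = ord(hi[0]) + 1
--         span = omax - omin
--         if span >= cur:
--             return build(["" if q == 0 else chr(q)
--                           for q in (omin + i * span // cur for i in range(cur + 1))])
--         build = (lambda f, a, b:
--                  lambda acc: f([chr(o) + s for s in acc for o in range(a, b + 1)]))(build, omin, omax)
--         cur = (cur + span - 1) // span
--         lo, hi = lo[1:], hi[1:]
--         if hi < lo:
--             lo, hi = hi, lo
--     return build([""])
-- ===== Notes on version B (the rewrite author's own statement) =====
-- stated objective: alternative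
-- what changed: A's top-down recursion is replaced by a single descending loop that composes a builder closure (CPS) per character position and computes the quantile seed with one inlined integer formula (no int_quantiles helper, no n==1/min==max special cases, integer ceiling division instead of float math.ceil).
import Mathlib
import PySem

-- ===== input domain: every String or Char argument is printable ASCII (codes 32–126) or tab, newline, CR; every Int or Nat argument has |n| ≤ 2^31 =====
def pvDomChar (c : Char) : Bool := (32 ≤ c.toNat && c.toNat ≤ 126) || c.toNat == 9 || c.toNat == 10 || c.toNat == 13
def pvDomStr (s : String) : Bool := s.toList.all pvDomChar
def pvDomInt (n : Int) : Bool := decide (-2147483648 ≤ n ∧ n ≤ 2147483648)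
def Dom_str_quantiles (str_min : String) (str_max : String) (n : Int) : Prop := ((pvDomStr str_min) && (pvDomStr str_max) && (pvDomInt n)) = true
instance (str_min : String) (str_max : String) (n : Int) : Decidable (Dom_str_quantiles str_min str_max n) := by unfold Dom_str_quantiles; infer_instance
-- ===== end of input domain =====

-- B replaces A's top-down recursion by one descending loop that composes a builder closure
-- per character position (CPS) and computes the quantile seed by a single inlined formula;
-- same cost, genuinely different control structure (objective: alternative).


-- ===== PORT A =====
-- ord(s[0]) if s else 0 (A only reads the max side when it is provably nonempty)
def ordHead (l : List Char) : Int :=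
  match l with
  | [] => 0
  | c :: _ => (c.toNat : Int)

-- int_quantiles of Source A
def int_quantiles_A (mn mx n : Int) : List Int :=
  if mn = mx then [mn]
  else if n = 1 then [mn, mx]
  else (PySem.List.pyRange 0 (n + 1) 1).map (fun i => mn + PySem.Int.floordiv (i * (mx - mn)) n)

-- termination measure lemma for port A, cited in decreasing_by
theorem pv_swap_len (a b : List Char) (p : List Char × List Char)
    (hp : p = if PySem.Chars.strLt b a then (b, a) else (a, b)) (h : ¬(p.1 = [] ∧ p.2 = [])) :
    (p.1.drop 1).length + (p.2.drop 1).length < a.length + b.length := by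
  subst hp
  by_cases hq : PySem.Chars.strLt b a = true <;>
    simp only [hq, if_pos, if_neg, Bool.false_eq_true, not_false_iff] <;>
    simp only [hq, if_pos, if_neg, Bool.false_eq_true, not_false_iff] at h <;>
    rcases a with _ | ⟨x, a⟩ <;> rcases b with _ | ⟨y, b⟩ <;> simp_all <;> omega

-- A's recursion, on List Char (strings as their char lists; the final map to String is in the wrapper).
-- math.ceil(n / d) is ported as the integer ceiling -((-n) // d): exact on Dom (|n| ≤ 2^31, 1 ≤ d ≤ 126,
-- where the float division cannot round across an integer).
def sqA_core (a b : List Char) (n : Int) : List (List Char) :=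
  let p := if PySem.Chars.strLt b a then (b, a) else (a, b)
  if h : p.1 = [] ∧ p.2 = [] then [[]]
  else
    let omin : Int := ordHead p.1
    let omax : Int := ordHead p.2 + 1
    if omax - omin ≥ n then
      (int_quantiles_A omin omax n).map (fun q => if q = 0 then [] else [Char.ofNat q.toNat])
    else
      (sqA_core (p.1.drop 1) (p.2.drop 1) (-(PySem.Int.floordiv (-n) (omax - omin)))).flatMap
        (fun sub => (PySem.List.pyRange omin (omax + 1) 1).map (fun o => Char.ofNat o.toNat :: sub))
termination_by a.length + b.length
decreasing_by exact pv_swap_len _ _ _ rfl h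

def str_quantiles (str_min : String) (str_max : String) (n : Int) : List String :=
  (sqA_core str_min.toList str_max.toList n).map (fun cs => String.ofList cs)

-- ===== PORT B =====
-- termination measure lemma for port B's loop, cited in decreasing_by
theorem pv_drop_len (lo hi : List Char) (p : List Char × List Char)
    (hp : p = if PySem.Chars.strLt (hi.drop 1) (lo.drop 1) then (hi.drop 1, lo.drop 1) else (lo.drop 1, hi.drop 1))
    (h : ¬(lo = [] ∧ hi = [])) :
    p.1.length + p.2.length < lo.length + hi.length := by
  subst hp
  by_cases hq : PySem.Chars.strLt (hi.drop 1) (lo.drop 1) = true <;>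
    simp only [hq, if_pos, if_neg, Bool.false_eq_true, not_false_iff] <;>
    rcases lo with _ | ⟨x, lo⟩ <;> rcases hi with _ | ⟨y, hi⟩ <;> simp_all <;> omega

-- the while-loop of Source B: `build` is the composed closure accumulated so far; each iteration
-- either returns build(seed) (seed by the inlined quantile formula) or wraps one more
-- per-position expansion around build and advances the state
def sqB_loop (lo hi : List Char) (cur : Int) (build : List (List Char) → List (List Char)) : List (List Char) :=
  if h : lo = [] ∧ hi = [] then build [[]]
  else
    let omin : Int := (lo.head?.map (fun c => (c.toNat : Int))).getD 0
    let omax : Int := (hi.head?.map (fun c => (c.toNat : Int))).getD 0 + 1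
    let span := omax - omin
    if span ≥ cur then
      build ((PySem.List.pyRange 0 (cur + 1) 1).map
        (fun i => let q := omin + PySem.Int.floordiv (i * span) cur
                  if q = 0 then [] else [Char.ofNat q.toNat]))
    else
      let p := if PySem.Chars.strLt (hi.drop 1) (lo.drop 1) then (hi.drop 1, lo.drop 1)
               else (lo.drop 1, hi.drop 1)
      sqB_loop p.1 p.2 (PySem.Int.floordiv (cur + span - 1) span)
        (fun acc => build (acc.flatMap
          (fun s => (PySem.List.pyRange omin (omax + 1) 1).map (fun o => Char.ofNat o.toNat :: s))))
termination_by lo.length + hi.length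
decreasing_by exact pv_drop_len _ _ _ rfl h

def str_quantiles_alt (str_min : String) (str_max : String) (n : Int) : List String :=
  let p := if PySem.Chars.strLt str_max.toList str_min.toList
           then (str_max.toList, str_min.toList) else (str_min.toList, str_max.toList)
  (sqB_loop p.1 p.2 n (fun acc => acc)).map (fun cs => String.ofList cs)

-- ===== PRECONDITION & SPEC =====
-- Pre_ excludes exactly the inputs where Python A raises ZeroDivisionError: n = 0 with the
-- strings not both empty (int_quantiles then divides by n); A returns on everything else.
def Pre_str_quantiles (str_min : String) (str_max : String) (n : Int) : Prop :=
  n ≠ 0 ∨ (str_min = "" ∧ str_max = "")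
instance (str_min : String) (str_max : String) (n : Int) : Decidable (Pre_str_quantiles str_min str_max n) := by unfold Pre_str_quantiles; infer_instance
def pvWitness_str_quantiles : String × String × Int := ("ab", "b", 5)

def Spec_str_quantiles (str_min : String) (str_max : String) (n : Int) (out : List String) : Prop := out = str_quantiles_alt str_min str_max n
instance (str_min : String) (str_max : String) (n : Int) (out : List String) : Decidable (Spec_str_quantiles str_min str_max n out) := by unfold Spec_str_quantiles; infer_instance

-- ===== CLAIM (what is proved, stated in full; the proofs are below) =====
def Claim_equal_str_quantiles : Prop := ∀ (str_min : String) (str_max : String) (n : Int), Dom_str_quantiles str_min str_max n → Pre_str_quantiles str_min str_max n → Spec_str_quantiles str_min str_max n (str_quantiles str_min str_max n)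

-- ===== LEMMAS AND PROOFS =====

theorem ordHead_eq (l : List Char) : (l.head?.map (fun c => (c.toNat : Int))).getD 0 = ordHead l := by
  cases l <;> rfl

theorem strLt_asymm (a b : List Char) (h : PySem.Chars.strLt b a = true) :
    PySem.Chars.strLt a b = false := by
  simp only [PySem.Chars.strLt, decide_eq_true_eq, decide_eq_false_iff_not] at *
  exact lt_asymm h

theorem ordHead_lt (lo hi : List Char) (hs : PySem.Chars.strLt hi lo = false)
    (h : ¬(lo = [] ∧ hi = [])) : ordHead lo < ordHead hi + 1 := by
  simp only [PySem.Chars.strLt, decide_eq_false_iff_not] at hs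
  rcases lo with _ | ⟨d, s⟩
  · rcases hi with _ | ⟨c, t⟩
    · exact absurd ⟨rfl, rfl⟩ h
    · simp [ordHead]
  · rcases hi with _ | ⟨c, t⟩
    · exact absurd (List.nil_lt_cons d s) hs
    · have hle : d ≤ c := by
        by_contra hcd
        simp only [not_le] at hcd
        exact hs (List.cons_lt_cons_iff.mpr (Or.inl hcd))
      have h2 : d.toNat ≤ c.toNat := Char.le_def.mp hle
      simp only [ordHead]
      omega

theorem ceil_eq (n d : Int) (hd : 0 < d) :
    -(PySem.Int.floordiv (-n) d) = PySem.Int.floordiv (n + d - 1) d := by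
  have h1 := (PySem.Int.floordiv_eq_iff_of_pos hd (a := n + d - 1) (q := PySem.Int.floordiv (n + d - 1) d)).mp rfl
  rw [PySem.Int.neg_floordiv_neg_eq_iff_of_pos hd]
  constructor <;> nlinarith [h1.1, h1.2]

-- B's inlined seed formula equals A's int_quantiles (mapped to chars), given mn < mx
theorem seed_eq (mn mx cur : Int) (hlt : mn < mx) :
    (PySem.List.pyRange 0 (cur + 1) 1).map
      (fun i => let q := mn + PySem.Int.floordiv (i * (mx - mn)) cur
                if q = 0 then ([] : List Char) else [Char.ofNat q.toNat])
    = (int_quantiles_A mn mx cur).map (fun q => if q = 0 then [] else [Char.ofNat q.toNat]) := by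
  unfold int_quantiles_A
  rw [if_neg (by omega)]
  by_cases h1 : cur = 1
  · subst h1
    have : PySem.List.pyRange 0 2 1 = [0, 1] := by decide
    simp [this]
  · rw [if_neg h1, List.map_map]
    rfl

-- swapping the arguments is what sqA_core does itself: explicit symmetry in that case
theorem sqA_swap (a b : List Char) (n : Int) (h : PySem.Chars.strLt b a = true) :
    sqA_core a b n = sqA_core b a n := by
  rw [sqA_core, sqA_core]
  simp only [h, if_pos, strLt_asymm a b h, Bool.false_eq_true, if_neg, not_false_iff]

-- main loop invariant: on a sorted pair, the loop returns build applied to A's recursion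
theorem loop_eq_aux (N : Nat) : ∀ (lo hi : List Char) (cur : Int)
    (build : List (List Char) → List (List Char)), lo.length + hi.length ≤ N →
    PySem.Chars.strLt hi lo = false →
    sqB_loop lo hi cur build = build (sqA_core lo hi cur) := by
  induction N with
  | zero =>
    intro lo hi cur build hN hs
    have ha : lo = [] := by cases lo <;> simp_all
    have hb : hi = [] := by cases hi <;> simp_all
    subst ha; subst hb
    rw [sqB_loop, sqA_core]
    simp [PySem.Chars.strLt]
  | succ N ih =>
    intro lo hi cur build hN hs
    rw [sqB_loop, sqA_core]
    simp only [hs, Bool.false_eq_true, if_neg, not_false_iff]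
    by_cases hbase : lo = [] ∧ hi = []
    · simp [hbase]
    · simp only [hbase, dif_neg, not_false_iff, ordHead_eq]
      have hlt := ordHead_lt lo hi hs hbase
      by_cases hc : ordHead hi + 1 - ordHead lo ≥ cur
      · simp only [hc, if_pos]
        rw [seed_eq _ _ _ (by omega)]
      · simp only [hc, if_neg, not_false_iff]
        set p := if PySem.Chars.strLt (hi.drop 1) (lo.drop 1) then (hi.drop 1, lo.drop 1)
                 else (lo.drop 1, hi.drop 1) with hp
        have hsorted : PySem.Chars.strLt p.2 p.1 = false := by
          rw [hp]
          by_cases hq : PySem.Chars.strLt (hi.drop 1) (lo.drop 1) = true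
          · simp only [hq, if_pos]
            exact strLt_asymm _ _ hq
          · simp only [hq, Bool.false_eq_true, if_neg, not_false_iff]
        have hlen : p.1.length + p.2.length ≤ N := by
          have := pv_drop_len lo hi p hp hbase
          omega
        rw [ih p.1 p.2 _ _ hlen hsorted]
        have hA : sqA_core (lo.drop 1) (hi.drop 1)
              (-(PySem.Int.floordiv (-cur) (ordHead hi + 1 - ordHead lo)))
            = sqA_core p.1 p.2 (PySem.Int.floordiv (cur + (ordHead hi + 1 - ordHead lo) - 1)
                (ordHead hi + 1 - ordHead lo)) := by
          rw [ceil_eq _ _ (by omega), hp]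
          by_cases hq : PySem.Chars.strLt (hi.drop 1) (lo.drop 1) = true
          · simp only [hq, if_pos]
            exact sqA_swap _ _ _ hq
          · simp only [hq, Bool.false_eq_true, if_neg, not_false_iff]
        rw [hA]

theorem loop_eq (lo hi : List Char) (cur : Int)
    (build : List (List Char) → List (List Char)) (hs : PySem.Chars.strLt hi lo = false) :
    sqB_loop lo hi cur build = build (sqA_core lo hi cur) :=
  loop_eq_aux (lo.length + hi.length) lo hi cur build le_rfl hs

-- ===== VERDICT (by name: the statement is the Claim_ definition above) =====
theorem str_quantiles_spec : Claim_equal_str_quantiles := by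
  intro s1 s2 n _ _
  unfold Spec_str_quantiles str_quantiles str_quantiles_alt
  by_cases hq : PySem.Chars.strLt s2.toList s1.toList = true
  · simp only [hq, if_pos]
    rw [loop_eq _ _ _ _ (strLt_asymm _ _ hq), sqA_swap _ _ _ hq]
  · simp only [hq, Bool.false_eq_true, if_neg, not_false_iff]
    rw [loop_eq _ _ _ _ (by simpa using hq)]
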